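-- pv_equiv track=rewrite | github.com/RedSnicker/Renderdragon_BOT | cogs/scramble.py | from_scrambled_to_original
-- ===== SOURCE A (Python) =====
-- def from_scrambled_to_original(scrambled, key):
--     scrambled = scrambled.replace(key, "", 1)
--     scrambled = scrambled.replace("Scrambled: ", "", 1)
--     scrambled = scrambled.replace(f", Key: {key}", "")
--
--     lines = (len(scrambled) + 1) // 2
--     part1 = scrambled[:lines]
--     part2 = scrambled[lines:]
--     original_text = ''.join(a + b for a, b in zip(part1, part2))
--     if len(part1) > len(part2): return original_text + part1[-1]
--     return original_text
-- ===== SOURCE B (Python) =====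
-- def from_scrambled_to_original(scrambled, key):
--     scrambled = scrambled.replace(key, "", 1)
--     scrambled = scrambled.replace("Scrambled: ", "", 1)
--     scrambled = scrambled.replace(f", Key: {key}", "")
--
--     n = len(scrambled)
--     half = (n + 1) // 2
--     res = [''] * n
--     res[::2] = scrambled[:half]
--     res[1::2] = scrambled[half:]
--     return ''.join(res)
-- ===== Notes on version B (the rewrite author's own statement) =====
-- stated objective: idiomatic
-- what changed: After the identical replace preprocessing, B reconstructs the string by slice-assigning the two halves into the even and odd positions of a preallocated list (res[::2]/res[1::2]) instead of zipping the halves, concatenating each pair, and special-casing the odd leftover character with a conditional append.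
import Mathlib
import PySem

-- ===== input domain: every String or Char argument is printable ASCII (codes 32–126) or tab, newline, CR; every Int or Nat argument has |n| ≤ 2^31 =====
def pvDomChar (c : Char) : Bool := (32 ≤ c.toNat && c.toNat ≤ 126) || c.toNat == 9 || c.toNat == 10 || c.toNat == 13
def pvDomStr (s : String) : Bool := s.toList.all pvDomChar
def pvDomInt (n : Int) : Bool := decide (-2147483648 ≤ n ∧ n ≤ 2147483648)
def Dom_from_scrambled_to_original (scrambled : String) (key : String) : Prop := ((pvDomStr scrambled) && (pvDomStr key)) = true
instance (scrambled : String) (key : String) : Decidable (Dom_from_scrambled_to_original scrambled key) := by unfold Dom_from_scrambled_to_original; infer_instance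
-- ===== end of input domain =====

-- B replaces A's zip-interleave plus odd-leftover branch by slice assignment into a
-- preallocated list (res[::2]/res[1::2]); objective: idiomatic, same return value.


-- s.replace(old, new, 1): remove/replace the first occurrence only (PySem.Str.replace has
-- no count, so this is ported by hand via PySem.Str.find; exact on all inputs, including
-- old = "" where Python's find returns 0 and the replacement is prepended).
def pvReplaceOnce (s old new : String) : String :=
  let i := PySem.Str.find s old
  if i < 0 then s
  else String.ofList (s.toList.take i.toNat ++ new.toList ++ s.toList.drop (i.toNat + old.toList.length))

-- the three replace lines, textually identical in A and in B
def pvClean (scrambled : String) (key : String) : String :=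
  let s1 := pvReplaceOnce scrambled key ""
  let s2 := pvReplaceOnce s1 "Scrambled: " ""
  PySem.Str.replace s2 (String.ofList ((", Key: ").toList ++ key.toList)) ""

-- ===== PORT A =====
def from_scrambled_to_original (scrambled : String) (key : String) : String :=
  let t := pvClean scrambled key
  let l := t.toList
  let lines := (l.length + 1) / 2
  let part1 := l.take lines          -- scrambled[:lines]
  let part2 := l.drop lines          -- scrambled[lines:]
  let original := ((part1.zip part2).map (fun ab => [ab.1, ab.2])).flatten
  if part2.length < part1.length then
    -- part1[-1]; in this branch part1 ≠ [] so pyGet? is some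
    String.ofList (original ++ [(PySem.List.pyGet? part1 (-1)).getD ' '])
  else String.ofList original

-- ===== PORT B =====
-- res[::2] = vals  (Python requires |vals| = ceil(|res|/2); used only with matching lengths)
def pvAssignEven : List Char → List Char → List Char
  | res, [] => res
  | [], _ => []
  | [_], v :: _ => [v]
  | _ :: r2 :: rs, v :: vs => v :: r2 :: pvAssignEven rs vs

-- res[1::2] = vals
def pvAssignOdd (res : List Char) (vals : List Char) : List Char :=
  match res with
  | [] => res
  | r :: rs => r :: pvAssignEven rs vals

def from_scrambled_to_original_alt (scrambled : String) (key : String) : String :=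
  let t := pvClean scrambled key
  let l := t.toList
  let n := l.length
  let half := (n + 1) / 2
  let res := List.replicate n ' '    -- [''] * n; '' placeholder modelled as ' '
  let res1 := pvAssignEven res (l.take half)
  let res2 := pvAssignOdd res1 (l.drop half)
  String.ofList res2

-- ===== PRECONDITION & SPEC =====
def Spec_from_scrambled_to_original (scrambled : String) (key : String) (out : String) : Prop := out = from_scrambled_to_original_alt scrambled key
instance (scrambled : String) (key : String) (out : String) : Decidable (Spec_from_scrambled_to_original scrambled key out) := by unfold Spec_from_scrambled_to_original; infer_instance

-- ===== CLAIM (what is proved, stated in full; the proofs are below) =====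
def Claim_equal_from_scrambled_to_original : Prop := ∀ (scrambled : String) (key : String), Dom_from_scrambled_to_original scrambled key → Spec_from_scrambled_to_original scrambled key (from_scrambled_to_original scrambled key)

-- ===== LEMMAS AND PROOFS =====

-- common value: interleave p1 and p2, taking from p1 first
def pvIl : List Char → List Char → List Char
  | [], ys => ys
  | x :: xs, ys => x :: pvIl ys xs
termination_by xs ys => xs.length + ys.length
decreasing_by simp; omega

theorem pvAssignEven_length (res vals : List Char) :
    (pvAssignEven res vals).length = res.length := by
  fun_induction pvAssignEven res vals <;> simp [*]

-- B's two slice assignments produce the interleaving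
theorem pvAssign_eq_il (p1 p2 res : List Char)
    (hr : res.length = p1.length + p2.length)
    (h1 : p2.length ≤ p1.length) (h2 : p1.length ≤ p2.length + 1) :
    pvAssignOdd (pvAssignEven res p1) p2 = pvIl p1 p2 := by
  induction p1 generalizing p2 res with
  | nil =>
    have hp2 : p2 = [] := by simpa using h1
    subst hp2
    have hres : res = [] := List.length_eq_zero_iff.mp (by simpa using hr)
    subst hres
    simp [pvAssignEven, pvAssignOdd, pvIl]
  | cons a p1' ih =>
    cases p2 with
    | nil =>
      have hp1' : p1' = [] := by cases p1' <;> simp_all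
      subst hp1'
      obtain ⟨r, hres⟩ : ∃ r, res = [r] := by
        cases res with
        | nil => simp at hr
        | cons r rs => cases rs <;> simp_all
      subst hres
      simp [pvAssignEven, pvAssignOdd, pvIl]
    | cons b p2' =>
      obtain ⟨r1, r2, res', hres⟩ : ∃ r1 r2 res', res = r1 :: r2 :: res' := by
        cases res with
        | nil => simp at hr
        | cons r1 rs =>
          cases rs with
          | nil => simp at hr; omega
          | cons r2 res' => exact ⟨r1, r2, res', rfl⟩
      subst hres
      simp only [pvAssignEven]
      have hW := pvAssignEven_length res' p1'
      have hIH := ih p2' res' (by simp at hr ⊢; omega)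
        (by simp at h1 ⊢; omega) (by simp at h2 ⊢; omega)
      cases hW' : pvAssignEven res' p1' with
      | nil =>
        have hres' : res' = [] := by
          have hlen := pvAssignEven_length res' p1'
          rw [hW'] at hlen
          exact List.length_eq_zero_iff.mp hlen.symm
        subst hres'
        simp only [List.length_cons, List.length_nil] at hr
        have hp1' : p1' = [] := List.length_eq_zero_iff.mp (by omega)
        have hp2' : p2' = [] := List.length_eq_zero_iff.mp (by omega)
        subst hp1'; subst hp2'
        simp [pvAssignOdd, pvAssignEven, pvIl]
      | cons w W' =>
        simp only [pvAssignOdd, pvAssignEven]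
        rw [hW'] at hIH
        simp only [pvAssignOdd] at hIH
        simp [pvIl, ← hIH]

-- A's zip-join plus leftover branch produces the interleaving
theorem pvZip_eq_il (p1 p2 : List Char)
    (h1 : p2.length ≤ p1.length) (h2 : p1.length ≤ p2.length + 1) :
    (if p2.length < p1.length then
      (((p1.zip p2).map (fun ab => [ab.1, ab.2])).flatten
        ++ [(PySem.List.pyGet? p1 (-1)).getD ' '])
     else ((p1.zip p2).map (fun ab => [ab.1, ab.2])).flatten) = pvIl p1 p2 := by
  induction p2 generalizing p1 with
  | nil =>
    cases p1 with
    | nil => simp [pvIl]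
    | cons a p1' =>
      have : p1' = [] := by cases p1' <;> simp_all
      subst this
      simp [pvIl, PySem.List.pyGet?_neg_one]
  | cons b p2' ih =>
    cases p1 with
    | nil => simp at h1
    | cons a p1' =>
      have hIH := ih p1' (by simp at h1 ⊢; omega) (by simp at h2 ⊢; omega)
      simp only [List.zip_cons_cons, List.map_cons, List.flatten_cons, pvIl]
      by_cases hc : p2'.length < p1'.length
      · have hne : p1' ≠ [] := by intro h; subst h; simp at hc
        rw [if_pos (by simpa using hc)] at ⊢
        rw [if_pos hc] at hIH
        have : PySem.List.pyGet? (a :: p1') (-1) = PySem.List.pyGet? p1' (-1) := by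
          obtain ⟨c, rest, rfl⟩ := List.exists_cons_of_ne_nil hne
          rw [PySem.List.pyGet?_neg_one, PySem.List.pyGet?_neg_one, List.getLast?_cons_cons]
        simp [this, ← hIH]
      · rw [if_neg (by simpa using hc)]
        rw [if_neg hc] at hIH
        simp [← hIH]

-- ===== VERDICT (by name: the statement is the Claim_ definition above) =====
theorem from_scrambled_to_original_spec : Claim_equal_from_scrambled_to_original := by
  intro scrambled key _
  unfold Spec_from_scrambled_to_original
  show from_scrambled_to_original scrambled key = _
  simp only [from_scrambled_to_original, from_scrambled_to_original_alt]
  set l := (pvClean scrambled key).toList with hl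
  set lines := (l.length + 1) / 2 with hlines
  have htake : (l.take lines).length = lines := by
    simp [List.length_take]; omega
  have hdrop : (l.drop lines).length = l.length - lines := by simp
  have h1 : (l.drop lines).length ≤ (l.take lines).length := by
    rw [htake, hdrop]; omega
  have h2 : (l.take lines).length ≤ (l.drop lines).length + 1 := by
    rw [htake, hdrop]; omega
  have hA := pvZip_eq_il (l.take lines) (l.drop lines) h1 h2
  have hB := pvAssign_eq_il (l.take lines) (l.drop lines)
    (List.replicate l.length ' ') (by rw [htake, hdrop]; simp; omega) h1 h2
  rw [hB]
  split_ifs with hc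
  · rw [if_pos hc] at hA; rw [hA]
  · rw [if_neg hc] at hA; rw [hA]
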